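-- pv_equiv track=rewrite | github.com/partmanager/netbom | src/netbom/bom.py | _strip_designator_roomletter
-- ===== SOURCE A (Python) =====
-- def _strip_designator_roomletter(designator: str) -> None:
--     output = []
--     was_char_numeric = False
--     for char in designator:
--         if was_char_numeric and not char.isnumeric():
--             break
--         output.append(char)
--         was_char_numeric = char.isnumeric()
--     return "".join(output)
-- ===== SOURCE B (Python) =====
-- def _strip_designator_roomletter(designator: str) -> None:
--     # B: locate the first numeric character, then consume the numeric run;
--     # everything after that run is dropped.  No digit at all -> unchanged.
--     n = len(designator)
--     i = 0
--     while i < n and not designator[i].isnumeric():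
--         i += 1
--     if i == n:
--         return designator
--     end = i
--     while end < n and designator[end].isnumeric():
--         end += 1
--     return designator[:end]
-- ===== Notes on version B (the rewrite author's own statement) =====
-- stated objective: alternative
-- what changed: Replaces A's single stateful lookback pass (accumulator list + was_char_numeric flag + break) with two index scans: find the first numeric character, then consume the numeric run and return the slice up to its end (or the string unchanged if it has no numeric char).
import Mathlib
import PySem

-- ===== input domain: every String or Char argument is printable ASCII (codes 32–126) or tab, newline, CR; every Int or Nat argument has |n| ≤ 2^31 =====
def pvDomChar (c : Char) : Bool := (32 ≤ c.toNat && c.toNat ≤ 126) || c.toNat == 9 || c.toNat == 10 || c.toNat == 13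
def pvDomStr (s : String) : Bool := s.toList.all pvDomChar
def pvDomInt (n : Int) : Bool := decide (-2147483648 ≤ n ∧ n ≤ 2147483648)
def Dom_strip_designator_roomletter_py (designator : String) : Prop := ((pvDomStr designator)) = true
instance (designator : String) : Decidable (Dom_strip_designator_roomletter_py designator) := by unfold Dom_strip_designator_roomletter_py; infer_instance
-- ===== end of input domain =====

-- B changes the decomposition: two index scans (first digit, end of digit run) and one slice
-- instead of A's stateful accumulate-with-break pass; same value everywhere on Dom.

-- ===== PORT A =====
-- the for-loop with `break`: state = (accumulated output, was_char_numeric)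
def pvLoopA (cs : List Char) (wasNum : Bool) (acc : List Char) : List Char :=
  match cs with
  | [] => acc
  | c :: rest =>
    if wasNum && !(PySem.Chars.isdigit c) then acc
    else pvLoopA rest (PySem.Chars.isdigit c) (acc ++ [c])

def strip_designator_roomletter_py (designator : String) : String :=
  String.ofList (pvLoopA designator.toList false [])

-- ===== PORT B =====
-- first while loop: index of the first numeric character (or length)
def pvScanToDigit (cs : List Char) (i : Nat) : Nat :=
  match cs with
  | [] => i
  | c :: rest => if PySem.Chars.isdigit c then i else pvScanToDigit rest (i + 1)

-- second while loop: index just past the numeric run starting at `e`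
def pvScanDigits (cs : List Char) (e : Nat) : Nat :=
  match cs with
  | [] => e
  | c :: rest => if PySem.Chars.isdigit c then pvScanDigits rest (e + 1) else e

def strip_designator_roomletter_py_alt (designator : String) : String :=
  let cs := designator.toList
  let i := pvScanToDigit cs 0
  if i = cs.length then designator
  else
    let e := pvScanDigits (cs.drop i) i
    String.ofList (PySem.List.slice cs none (some (e : Int)))

-- ===== PRECONDITION & SPEC =====
def Spec_strip_designator_roomletter_py (designator : String) (out : String) : Prop := out = strip_designator_roomletter_py_alt designator
instance (designator : String) (out : String) : Decidable (Spec_strip_designator_roomletter_py designator out) := by unfold Spec_strip_designator_roomletter_py; infer_instance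

-- ===== CLAIM (what is proved, stated in full; the proofs are below) =====
def Claim_equal_strip_designator_roomletter_py : Prop := ∀ (designator : String), Dom_strip_designator_roomletter_py designator → Spec_strip_designator_roomletter_py designator (strip_designator_roomletter_py designator)

-- ===== LEMMAS AND PROOFS =====

theorem pvLoopA_true (cs : List Char) (acc : List Char) :
    pvLoopA cs true acc = acc ++ cs.takeWhile (fun c => PySem.Chars.isdigit c) := by
  induction cs generalizing acc with
  | nil => simp [pvLoopA]
  | cons c rest ih =>
    by_cases h : PySem.Chars.isdigit c = true
    · simp [pvLoopA, h, ih]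
    · simp [pvLoopA, h]

theorem pvLoopA_false (cs : List Char) (acc : List Char) :
    pvLoopA cs false acc =
      acc ++ cs.takeWhile (fun c => !PySem.Chars.isdigit c) ++
        (cs.dropWhile (fun c => !PySem.Chars.isdigit c)).takeWhile (fun c => PySem.Chars.isdigit c) := by
  induction cs generalizing acc with
  | nil => simp [pvLoopA]
  | cons c rest ih =>
    by_cases h : PySem.Chars.isdigit c = true
    · simp [pvLoopA, h, pvLoopA_true]
    · simp [pvLoopA, h, ih]

theorem pvScanToDigit_eq (cs : List Char) (i : Nat) :
    pvScanToDigit cs i = i + (cs.takeWhile (fun c => !PySem.Chars.isdigit c)).length := by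
  induction cs generalizing i with
  | nil => simp [pvScanToDigit]
  | cons c rest ih =>
    by_cases h : PySem.Chars.isdigit c = true
    · simp [pvScanToDigit, h]
    · simp [pvScanToDigit, h, ih]; omega

theorem pvScanDigits_eq (cs : List Char) (e : Nat) :
    pvScanDigits cs e = e + (cs.takeWhile (fun c => PySem.Chars.isdigit c)).length := by
  induction cs generalizing e with
  | nil => simp [pvScanDigits]
  | cons c rest ih =>
    by_cases h : PySem.Chars.isdigit c = true
    · simp [pvScanDigits, h, ih]; omega
    · simp [pvScanDigits, h]

theorem drop_takeWhile_len (p : Char → Bool) (cs : List Char) :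
    cs.drop (cs.takeWhile p).length = cs.dropWhile p := by
  induction cs with
  | nil => simp
  | cons c rest ih =>
    by_cases h : p c = true
    · simp [List.dropWhile_cons, h, ih]
    · simp [List.dropWhile_cons, h]

theorem take_takeWhile_len (p : Char → Bool) (cs : List Char) :
    cs.take (cs.takeWhile p).length = cs.takeWhile p := by
  induction cs with
  | nil => simp
  | cons c rest ih =>
    by_cases h : p c = true
    · simp [h, ih]
    · simp [h]

-- ===== VERDICT (by name: the statement is the Claim_ definition above) =====
theorem strip_designator_roomletter_py_spec : Claim_equal_strip_designator_roomletter_py := by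
  intro d _
  unfold Spec_strip_designator_roomletter_py strip_designator_roomletter_py strip_designator_roomletter_py_alt
  set cs := d.toList with hcs
  set pre := cs.takeWhile (fun c => !PySem.Chars.isdigit c) with hpre
  have hsub : pre.Sublist cs := by
    simpa [hpre] using List.takeWhile_sublist (p := fun c => !PySem.Chars.isdigit c) (l := cs)
  have hlenpre : pre.length ≤ cs.length := hsub.length_le
  simp only [pvScanToDigit_eq, Nat.zero_add, ← hpre]
  by_cases hi : pre.length = cs.length
  · -- no digit: takeWhile is the whole list, dropWhile is empty
    have hall : pre = cs := hsub.eq_of_length hi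
    have hdw : cs.dropWhile (fun c => !PySem.Chars.isdigit c) = [] := by
      have := drop_takeWhile_len (fun c => !PySem.Chars.isdigit c) cs
      rw [← hpre, hi] at this
      simpa using this.symm
    rw [if_pos hi, pvLoopA_false, ← hpre, hdw]
    simp [hall, hcs]
  · have hlt : pre.length < cs.length := lt_of_le_of_ne hlenpre hi
    have hdrop : cs.drop pre.length = cs.dropWhile (fun c => !PySem.Chars.isdigit c) := by
      simpa [hpre] using drop_takeWhile_len (fun c => !PySem.Chars.isdigit c) cs
    set run := (cs.dropWhile (fun c => !PySem.Chars.isdigit c)).takeWhile (fun c => PySem.Chars.isdigit c) with hrun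
    have he : pvScanDigits (cs.drop pre.length) pre.length = pre.length + run.length := by
      rw [hdrop, pvScanDigits_eq, ← hrun]
    have hslice : PySem.List.slice cs none (some ((pre.length + run.length : Nat) : Int)) =
        cs.take (pre.length + run.length) := by
      exact PySem.List.slice_to_natCast cs (pre.length + run.length)
    have htake : cs.take (pre.length + run.length) = pre ++ run := by
      have h1 : cs.take (pre.length + run.length) =
          cs.take pre.length ++ (cs.drop pre.length).take run.length := by
        rw [List.take_add]
      rw [h1, hdrop]
      have h2 : cs.take pre.length = pre := by
        simpa [hpre] using take_takeWhile_len (fun c => !PySem.Chars.isdigit c) cs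
      have h3 : (cs.dropWhile (fun c => !PySem.Chars.isdigit c)).take run.length = run := by
        simpa [hrun] using take_takeWhile_len (fun c => PySem.Chars.isdigit c)
          (cs.dropWhile (fun c => !PySem.Chars.isdigit c))
      rw [h2, h3]
    simp only [hi, if_false, he, hslice, htake, pvLoopA_false, List.nil_append, ← hpre, ← hrun]
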